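-- pv_equiv track=rewrite | github.com/cjackson98/CSE-231 | Projects/proj09.py | validate_hashtag
-- ===== SOURCE A (Python) =====
-- import string, calendar, pylab
--
-- def validate_hashtag(s):
--     '''confirms that the word/string is actaully a hashtag and not just a number
--     or a 1 letter word, Returns True/False for hashtag'''
--     hashtag=False
--     if len(s)>2 and s[0]=='#':#if the word is longer than 1 letter and starts with #
--         for item in s[1:]:
--             if item in string.punctuation:#if word contains punctuation after the hashtag
--                 hashtag=False#not a hashtag
--                 break#stop checking the rest of the word becuase once extra punctuation is found,
--                 #it can no longer be a hashtag
--             else: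
--                 hashtag=True
--     return hashtag
-- ===== SOURCE B (Python) =====
-- import string, re
--
-- _HASHTAG_RE = re.compile('#[^' + re.escape(string.punctuation) + ']{2,}')
--
-- def validate_hashtag(s):
--     '''confirms that the word/string is actaully a hashtag and not just a number
--     or a 1 letter word, Returns True/False for hashtag'''
--     return bool(_HASHTAG_RE.fullmatch(s))
-- ===== Notes on version B (the rewrite author's own statement) =====
-- stated objective: idiomatic
-- what changed: Replaces the manual flag-and-break loop with a single anchored regular expression (hash sign, then at least two characters from the negated punctuation class) checked by re.fullmatch, which encodes the length, prefix and no-punctuation conditions declaratively.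
import Mathlib
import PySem

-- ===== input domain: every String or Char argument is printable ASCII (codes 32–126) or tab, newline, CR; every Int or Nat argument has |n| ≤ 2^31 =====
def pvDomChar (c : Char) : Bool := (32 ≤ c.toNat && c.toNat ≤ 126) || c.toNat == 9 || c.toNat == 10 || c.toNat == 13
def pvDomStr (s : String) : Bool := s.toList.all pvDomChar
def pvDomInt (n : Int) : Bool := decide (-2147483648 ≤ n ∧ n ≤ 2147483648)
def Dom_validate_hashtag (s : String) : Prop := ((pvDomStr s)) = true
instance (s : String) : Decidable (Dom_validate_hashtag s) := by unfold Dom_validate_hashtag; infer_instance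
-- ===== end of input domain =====

-- B replaces A's manual flag-and-break loop with one anchored regular expression
-- '#[^<punctuation>]{2,}' checked via re.fullmatch (objective: idiomatic).

-- string.punctuation (module constant used by both programs)
def pvPunct : List Char := "!\"#$%&'()*+,-./:;<=>?@[\\]^_`{|}~".toList

-- ===== PORT A =====
-- the for-loop over s[1:] with its break and the 'hashtag' flag as accumulator
def pvLoopA : List Char → Bool → Bool
  | [], hashtag => hashtag
  | item :: rest, _ =>
      if pvPunct.contains item then false   -- hashtag=False; break
      else pvLoopA rest true                -- hashtag=True; continue

def validate_hashtag (s : String) : Bool :=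
  if ((PySem.Str.len s : Int) > 2) && (PySem.Str.pyGet? s 0 == some '#') then
    pvLoopA (PySem.Chars.slice s.toList (some 1) none) false
  else false

-- ===== PORT B =====
-- re.fullmatch('#' ++ '[^punct]{2,}', s): a literal '#', then at least two
-- characters each outside the punctuation class, anchored at both ends.
def validate_hashtag_alt (s : String) : Bool :=
  match s.toList with
  | c :: rest => (c == '#') && decide (2 ≤ rest.length) && rest.all (fun d => !(pvPunct.contains d))
  | [] => false

-- ===== PRECONDITION & SPEC =====
def Spec_validate_hashtag (s : String) (out : Bool) : Prop := out = validate_hashtag_alt s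
instance (s : String) (out : Bool) : Decidable (Spec_validate_hashtag s out) := by unfold Spec_validate_hashtag; infer_instance

-- ===== CLAIM (what is proved, stated in full; the proofs are below) =====
def Claim_equal_validate_hashtag : Prop := ∀ (s : String), Dom_validate_hashtag s → Spec_validate_hashtag s (validate_hashtag s)

-- ===== LEMMAS AND PROOFS =====

theorem pvLoopA_true (l : List Char) :
    pvLoopA l true = l.all (fun c => !(pvPunct.contains c)) := by
  induction l with
  | nil => rfl
  | cons c rest ih =>
      simp [pvLoopA, List.all_cons, ih]

theorem pvLoopA_cons (c : Char) (rest : List Char) (b : Bool) :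
    pvLoopA (c :: rest) b = (c :: rest).all (fun d => !(pvPunct.contains d)) := by
  simp [pvLoopA, List.all_cons, pvLoopA_true]

-- ===== VERDICT (by name: the statement is the Claim_ definition above) =====
theorem pvKey (l : List Char) :
    (if (decide ((l.length : Int) > 2) && (PySem.List.pyGet? l 0 == some '#')) = true then
        pvLoopA l.tail false
      else false) =
    (match l with
     | c :: rest => (c == '#') && decide (2 ≤ rest.length) && rest.all (fun d => !(pvPunct.contains d))
     | [] => false) := by
  cases l with
  | nil => simp
  | cons c rest =>
      simp only [List.tail_cons, PySem.List.pyGet?, PySem.List.pyIdx?]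
      by_cases hc : c = '#'
      · subst hc
        by_cases hlen : 2 ≤ rest.length
        · obtain ⟨d, rest', rfl⟩ : ∃ d rest', rest = d :: rest' := by
            cases rest with
            | nil => simp at hlen
            | cons d rest' => exact ⟨d, rest', rfl⟩
          have h3 : 1 ≤ rest'.length := by simpa using hlen
          have e1 : (2:Int) ≤ (rest'.length : Int) + 1 := by omega
          have e0 : (0:Int) ≤ (rest'.length : Int) + 1 := by omega
          simp [pvLoopA_cons, List.all_cons, e1, e0, h3]
        · simp [hlen, List.length_cons]
      · simp [hc]

theorem validate_hashtag_spec : Claim_equal_validate_hashtag := by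
  intro s _
  unfold Spec_validate_hashtag validate_hashtag validate_hashtag_alt
  rw [PySem.Chars.slice_eq_listSlice, PySem.List.slice_from_one]
  simp only [PySem.Str.len_eq, PySem.Str.pyGet?, PySem.Chars.pyGet?_eq_listPyGet?]
  exact pvKey s.toList
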